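-- pv_equiv track=rewrite | github.com/damian-ds7/WSI | cw1/knapsack.py | increment_bin_mask
-- ===== SOURCE A (Python) =====
-- def increment_bin_mask(mask, n):
--     for i in reversed(range(n)):
--         if mask[i] == 0:
--             mask[i] = 1
--             break
--         else:
--             mask[i] = 0
--     return mask
-- ===== SOURCE B (Python) =====
-- def increment_bin_mask(mask, n):
--     # Find the carry boundary first (rightmost zero among the first n cells),
--     # then do one bulk slice assignment instead of cell-by-cell writes.
--     idx = -1
--     for i in range(n):
--         if mask[i] == 0:
--             idx = i
--     if idx >= 0:
--         mask[idx + 1:n] = [0] * (n - 1 - idx)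
--         mask[idx] = 1
--     elif n > 0:
--         mask[0:n] = [0] * n
--     return mask
-- ===== Notes on version B (the rewrite author's own statement) =====
-- stated objective: alternative
-- what changed: B first locates the carry boundary with a left-to-right scan remembering the last zero, then rewrites the suffix with a single bulk slice assignment, instead of A's right-to-left loop that zeroes cells one by one until it hits a zero.
import Mathlib
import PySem

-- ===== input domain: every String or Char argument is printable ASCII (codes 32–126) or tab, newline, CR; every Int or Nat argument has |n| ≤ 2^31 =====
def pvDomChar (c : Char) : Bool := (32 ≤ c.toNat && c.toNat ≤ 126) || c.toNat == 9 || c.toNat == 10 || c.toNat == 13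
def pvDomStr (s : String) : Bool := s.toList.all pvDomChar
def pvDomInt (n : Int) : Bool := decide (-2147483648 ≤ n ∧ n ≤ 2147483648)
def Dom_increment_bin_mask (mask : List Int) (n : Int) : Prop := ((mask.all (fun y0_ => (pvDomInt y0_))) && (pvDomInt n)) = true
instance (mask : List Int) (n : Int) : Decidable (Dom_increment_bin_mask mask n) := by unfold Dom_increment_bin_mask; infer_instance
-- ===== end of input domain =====

-- B finds the carry boundary by a forward scan remembering the last zero, then rebuilds the
-- suffix in bulk, instead of A's right-to-left cell-by-cell loop (alternative decomposition,
-- same cost). In Python, B performs the same in-place mutation of `mask` as A; the theorem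
-- here is about the return value.


-- ===== PORT A =====
-- A's loop: for i in reversed(range(n)): if mask[i]==0: mask[i]=1; break else: mask[i]=0
-- 'aLoop m (i+1)' runs the iteration with loop variable i, then continues downward.
def aLoop (m : List Int) : Nat → List Int
  | 0 => m
  | i + 1 =>
    match m[i]? with
    | none => m            -- IndexError in Python; excluded by Pre_
    | some v => if v = 0 then m.set i 1 else aLoop (m.set i 0) i

def increment_bin_mask (mask : List Int) (n : Int) : List Int :=
  aLoop mask n.toNat

-- ===== PORT B =====
-- B's forward scan: for i in range(n): if mask[i]==0: idx = i   (last zero wins)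
-- 'bScan m k' is the value of idx after the first k iterations (none = idx == -1).
def bScan (m : List Int) : Nat → Option Nat
  | 0 => none
  | i + 1 =>
    match m[i]? with
    | none => bScan m i    -- IndexError in Python; excluded by Pre_
    | some v => if v = 0 then some i else bScan m i

def increment_bin_mask_alt (mask : List Int) (n : Int) : List Int :=
  let nn := n.toNat
  match bScan mask nn with
  | some idx => mask.take idx ++ 1 :: (List.replicate (nn - 1 - idx) 0 ++ mask.drop nn)
  | none => if 0 < n then List.replicate nn 0 ++ mask.drop nn else mask

-- ===== PRECONDITION & SPEC =====
-- A raises IndexError exactly when n exceeds the mask's length (its first access is mask[n-1]).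
def Pre_increment_bin_mask (mask : List Int) (n : Int) : Prop := n ≤ (mask.length : Int)
instance (mask : List Int) (n : Int) : Decidable (Pre_increment_bin_mask mask n) := by unfold Pre_increment_bin_mask; infer_instance
def pvWitness_increment_bin_mask : List Int × Int := ([1, 0, 1], 3)

def Spec_increment_bin_mask (mask : List Int) (n : Int) (out : List Int) : Prop := out = increment_bin_mask_alt mask n
instance (mask : List Int) (n : Int) (out : List Int) : Decidable (Spec_increment_bin_mask mask n out) := by unfold Spec_increment_bin_mask; infer_instance

-- ===== CLAIM (what is proved, stated in full; the proofs are below) =====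
def Claim_equal_increment_bin_mask : Prop := ∀ (mask : List Int) (n : Int), Dom_increment_bin_mask mask n → Pre_increment_bin_mask mask n → Spec_increment_bin_mask mask n (increment_bin_mask mask n)

-- ===== LEMMAS AND PROOFS =====

-- bScan only inspects indices below its counter, so setting a cell at or above it is invisible
theorem bScan_set_high (m : List Int) (j : Nat) (a : Int) :
    ∀ k, k ≤ j → bScan (m.set j a) k = bScan m k := by
  intro k
  induction k with
  | zero => intro _; rfl
  | succ i ih =>
    intro hk
    have hij : j ≠ i := by omega
    simp only [bScan, List.getElem?_set_ne hij, ih (by omega)]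

-- the index bScan returns is below its counter
theorem bScan_some_lt (m : List Int) : ∀ (k idx : Nat), bScan m k = some idx → idx < k := by
  intro k
  induction k with
  | zero => intro idx h; simp [bScan] at h
  | succ i ih =>
    intro idx h
    simp only [bScan] at h
    cases hg : m[i]? with
    | none =>
      simp only [hg] at h
      exact Nat.lt_succ_of_lt (ih _ h)
    | some w =>
      simp only [hg] at h
      by_cases hw : w = 0
      · rw [if_pos hw] at h
        injection h with h
        omega
      · rw [if_neg hw] at h
        exact Nat.lt_succ_of_lt (ih _ h)

theorem set_eq_take_cons_drop (m : List Int) (i : Nat) (a : Int) (h : i < m.length) :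
    m.set i a = m.take i ++ a :: m.drop (i + 1) := by
  rw [List.set_eq_take_append_cons_drop, if_pos h]

theorem replicate_append_zero_cons (k : Nat) (t : List Int) :
    List.replicate k (0:Int) ++ 0 :: t = List.replicate (k + 1) (0:Int) ++ t := by
  rw [List.replicate_succ', List.append_assoc]; rfl

-- main invariant: the downward carry loop equals the boundary-based reconstruction
theorem aLoop_eq (nn : Nat) : ∀ (m : List Int), nn ≤ m.length →
    aLoop m nn = (match bScan m nn with
      | some idx => m.take idx ++ 1 :: (List.replicate (nn - 1 - idx) 0 ++ m.drop nn)
      | none => List.replicate nn 0 ++ m.drop nn) := by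
  induction nn with
  | zero => intro m _; simp [aLoop, bScan]
  | succ i ih =>
    intro m hlen
    have hi : i < m.length := by omega
    have hget : m[i]? = some m[i] := List.getElem?_eq_getElem hi
    by_cases hz : m[i] = 0
    · -- current cell is 0: A sets it to 1 and stops; bScan returns i
      simp only [aLoop, bScan, hget, hz, if_true]
      rw [set_eq_take_cons_drop m i 1 hi]
      simp
    · -- carry: A zeroes the cell and continues; bScan skips it
      simp only [aLoop, bScan, hget, if_neg hz]
      rw [ih (m.set i 0) (by simpa using hi.le), bScan_set_high m i 0 i le_rfl]
      have hdrop : (m.set i 0).drop i = 0 :: m.drop (i + 1) := by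
        rw [List.drop_eq_getElem_cons (by simp; omega), List.drop_set]
        simp
      cases hbs : bScan m i with
      | none =>
        simp only
        rw [hdrop, replicate_append_zero_cons]
      | some idx =>
        have hidx : idx < i := bScan_some_lt m i idx hbs
        simp only
        rw [hdrop]
        have htake : (m.set i 0).take idx = m.take idx := by
          rw [List.take_set]
          exact List.set_eq_of_length_le (by simp; omega)
        rw [htake]
        have harith : i + 1 - 1 - idx = (i - 1 - idx) + 1 := by omega
        rw [harith, ← replicate_append_zero_cons]

-- ===== VERDICT (by name: the statement is the Claim_ definition above) =====
theorem increment_bin_mask_spec : Claim_equal_increment_bin_mask := by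
  intro mask n _ hpre
  unfold Spec_increment_bin_mask increment_bin_mask increment_bin_mask_alt
  have hnn : n.toNat ≤ mask.length := by
    unfold Pre_increment_bin_mask at hpre; omega
  rw [aLoop_eq n.toNat mask hnn]
  cases hbs : bScan mask n.toNat with
  | some idx => simp only [hbs]
  | none =>
    simp only [hbs]
    by_cases hn : 0 < n
    · rw [if_pos hn]
    · have h0 : n.toNat = 0 := by omega
      rw [if_neg hn, h0]
      simp
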